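-- pv_equiv track=rewrite | github.com/fronzbot/Stathammer | simulation.py | create_prob_dict
-- ===== SOURCE A (Python) =====
-- def create_prob_dict(data, attacks):
--     data.sort()
--     probdict = {}
--     # For every number of kills
--     for val in data:
--         if val > attacks:
--             val = attacks
--         try:
--             probdict[val] += 1
--         except KeyError:
--             probdict[val] = 1
--
--     return probdict
-- ===== SOURCE B (Python) =====
-- def create_prob_dict(data, attacks):
--     data.sort()
--     probdict = {}
--     i, n = 0, len(data)
--     while i < n:
--         val = data[i]
--         j = i + 1
--         while j < n and data[j] == val:
--             j += 1
--         key = val if val <= attacks else attacks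
--         probdict[key] = probdict.get(key, 0) + (j - i)
--         i = j
--     return probdict
-- ===== Notes on version B (the rewrite author's own statement) =====
-- stated objective: alternative
-- what changed: B walks the sorted list run by run with two index cursors (a group-by of consecutive equal values) and adds each run's length to its capped bucket in one dict update, instead of A's per-element increment with try/except.
import Mathlib
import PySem

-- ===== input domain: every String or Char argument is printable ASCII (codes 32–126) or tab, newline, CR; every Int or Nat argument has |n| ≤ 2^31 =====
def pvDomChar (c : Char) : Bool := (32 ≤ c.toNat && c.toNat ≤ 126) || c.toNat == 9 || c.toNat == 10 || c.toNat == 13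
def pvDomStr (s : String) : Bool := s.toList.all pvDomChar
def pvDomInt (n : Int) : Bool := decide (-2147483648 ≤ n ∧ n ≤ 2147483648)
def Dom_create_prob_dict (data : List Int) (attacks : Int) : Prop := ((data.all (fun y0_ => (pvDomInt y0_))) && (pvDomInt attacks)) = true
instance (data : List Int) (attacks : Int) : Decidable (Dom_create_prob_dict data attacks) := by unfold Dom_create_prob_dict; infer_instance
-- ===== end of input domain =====

-- B walks the sorted list run by run with two index cursors (group-by of consecutive equal values),
-- adding each run's length to its capped bucket in one dict update, instead of A's per-element
-- increment with try/except; both mutate `data` in place via data.sort(); the claim is about the return value.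


-- ===== PORT A =====
def create_prob_dict (data : List Int) (attacks : Int) : List (Int × Int) :=
  ((PySem.List.sorted data (fun x => x) false).foldl
    (fun d val =>
      let v := if val > attacks then attacks else val
      -- try: probdict[v] += 1 / except KeyError: probdict[v] = 1  ==  insert v (getD v 0 + 1)
      d.insert v (d.getD v 0 + 1))
    PySem.Dict.empty).items

-- ===== PORT B =====
-- inner while loop: `j = i + 1; while j < n and data[j] == val: j += 1`
def pvRunEnd (data : List Int) (n : Nat) (val : Int) (j : Nat) : Nat :=
  if j < n ∧ data.getD j 0 = val then pvRunEnd data n val (j + 1) else j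
termination_by n - j
decreasing_by omega

theorem pvRunEnd_gt (data : List Int) (n : Nat) (val : Int) (j : Nat) :
    j ≤ pvRunEnd data n val j := by
  induction j using pvRunEnd.induct (data := data) (n := n) (val := val) with
  | case1 j h ih => rw [pvRunEnd, if_pos h]; omega
  | case2 j h => rw [pvRunEnd, if_neg h]

-- outer while loop: `while i < n: … i = j`
def pvIdxLoop (data : List Int) (attacks : Int) (n : Nat) (i : Nat) (d : PySem.Dict Int Int) :
    PySem.Dict Int Int :=
  if i < n then
    let val := data.getD i 0
    let j := pvRunEnd data n val (i + 1)
    let key := if val ≤ attacks then val else attacks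
    pvIdxLoop data attacks n j (d.insert key (d.getD key 0 + ((j : Int) - (i : Int))))
  else d
termination_by n - i
decreasing_by
  have := pvRunEnd_gt data n (data.getD i 0) (i + 1)
  omega

def create_prob_dict_alt (data : List Int) (attacks : Int) : List (Int × Int) :=
  let s := PySem.List.sorted data (fun x => x) false
  (pvIdxLoop s attacks s.length 0 PySem.Dict.empty).items

-- ===== PRECONDITION & SPEC =====
def Spec_create_prob_dict (data : List Int) (attacks : Int) (out : List (Int × Int)) : Prop := out = create_prob_dict_alt data attacks
instance (data : List Int) (attacks : Int) (out : List (Int × Int)) : Decidable (Spec_create_prob_dict data attacks out) := by unfold Spec_create_prob_dict; infer_instance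

-- ===== CLAIM (what is proved, stated in full; the proofs are below) =====
def Claim_equal_create_prob_dict : Prop := ∀ (data : List Int) (attacks : Int), Dom_create_prob_dict data attacks → Spec_create_prob_dict data attacks (create_prob_dict data attacks)

-- ===== LEMMAS AND PROOFS =====

-- A's per-element step
def pvStep (attacks : Int) (d : PySem.Dict Int Int) (val : Int) : PySem.Dict Int Int :=
  let v := if val > attacks then attacks else val
  d.insert v (d.getD v 0 + 1)

-- proof-side view of B's inner loop: split off the leading run of `v`
def pvCountRun (v : Int) : List Int → Nat × List Int
  | [] => (0, [])
  | x :: xs =>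
    if x = v then
      let p := pvCountRun v xs
      (p.1 + 1, p.2)
    else (0, x :: xs)

theorem pvCountRun_len (v : Int) (xs : List Int) : (pvCountRun v xs).2.length ≤ xs.length := by
  induction xs with
  | nil => simp [pvCountRun]
  | cons x xs ih =>
    simp only [pvCountRun]
    split
    · simpa using Nat.le_succ_of_le ih
    · simp

theorem pvCountRun_split (v : Int) (xs : List Int) :
    xs = List.replicate (pvCountRun v xs).1 v ++ (pvCountRun v xs).2 := by
  induction xs with
  | nil => simp [pvCountRun]
  | cons x xs ih =>
    simp only [pvCountRun]
    split
    · next h => simpa [List.replicate_succ, h] using ih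
    · simp

-- proof-side view of B's outer loop, over the suffix list
def pvRunLoop (attacks : Int) : List Int → PySem.Dict Int Int → PySem.Dict Int Int
  | [], d => d
  | v :: xs, d =>
    let p := pvCountRun v xs
    let key := if v ≤ attacks then v else attacks
    pvRunLoop attacks p.2 (d.insert key (d.getD key 0 + ((p.1 : Int) + 1)))
termination_by l => l.length
decreasing_by
  exact Nat.lt_succ_of_le (pvCountRun_len v xs)

-- the index-based inner loop computes exactly the leading-run split of the suffix
theorem pvRunEnd_eq_countRun (data : List Int) (val : Int) :
    ∀ j : Nat, j ≤ data.length →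
      pvRunEnd data data.length val j ≤ data.length ∧
      pvCountRun val (data.drop j)
        = (pvRunEnd data data.length val j - j, data.drop (pvRunEnd data data.length val j)) := by
  intro j
  induction j using pvRunEnd.induct (data := data) (n := data.length) (val := val) with
  | case1 j h ih =>
    intro _
    obtain ⟨hj, hv⟩ := h
    have ihj := ih (by omega)
    rw [pvRunEnd, if_pos ⟨hj, hv⟩]
    refine ⟨ihj.1, ?_⟩
    have hdrop : data.drop j = data[j] :: data.drop (j + 1) :=
      List.drop_eq_getElem_cons hj
    have hgv : data[j] = val := by
      have := List.getD_eq_getElem data 0 hj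
      omega
    have hcons : pvCountRun val (val :: data.drop (j + 1))
        = ((pvCountRun val (data.drop (j + 1))).1 + 1, (pvCountRun val (data.drop (j + 1))).2) := by
      simp [pvCountRun]
    rw [hdrop, hgv, hcons, ihj.2]
    have hge := pvRunEnd_gt data data.length val (j + 1)
    simp only [Prod.mk.injEq]
    exact ⟨by omega, trivial⟩
  | case2 j h =>
    intro hjn
    rw [pvRunEnd, if_neg h]
    refine ⟨hjn, ?_⟩
    rcases Nat.lt_or_ge j data.length with hj | hj
    · have hdrop : data.drop j = data[j] :: data.drop (j + 1) :=
        List.drop_eq_getElem_cons hj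
      have hgv : data.getD j 0 = data[j] := List.getD_eq_getElem data 0 hj
      have hne : data[j] ≠ val := by
        intro hc; exact h ⟨hj, by omega⟩
      rw [hdrop]
      simp only [pvCountRun, if_neg hne]
      rw [← hdrop]
      simp
    · rw [List.drop_eq_nil_of_le (by omega)]
      simp [pvCountRun]

-- the index-based outer loop is the suffix-list loop
theorem pvIdxLoop_eq_runLoop (data : List Int) (attacks : Int) :
    ∀ (k i : Nat), data.length - i ≤ k → ∀ d : PySem.Dict Int Int,
      pvIdxLoop data attacks data.length i d = pvRunLoop attacks (data.drop i) d := by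
  intro k
  induction k with
  | zero =>
    intro i hk d
    have hge : data.length ≤ i := by omega
    rw [pvIdxLoop, if_neg (by omega : ¬ i < data.length), List.drop_eq_nil_of_le hge, pvRunLoop]
  | succ k ih =>
    intro i hk d
    rw [pvIdxLoop]
    by_cases hi : i < data.length
    · rw [if_pos hi]
      have hdrop : data.drop i = data[i] :: data.drop (i + 1) :=
        List.drop_eq_getElem_cons hi
      have hgv : data.getD i 0 = data[i] := List.getD_eq_getElem data 0 hi
      set val := data.getD i 0 with hval
      set e := pvRunEnd data data.length val (i + 1) with he
      have hcr := pvRunEnd_eq_countRun data val (i + 1) (by omega)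
      have hge := pvRunEnd_gt data data.length val (i + 1)
      rw [hdrop, pvRunLoop]
      simp only [← hgv, ← he] at hcr ⊢
      rw [hcr.2]
      have hnum : ((e - (i + 1) : Nat) : Int) + 1 = (e : Int) - (i : Int) := by omega
      rw [ih e (by omega) _]
      simp only [hnum]
    · rw [if_neg hi]
      rw [List.drop_eq_nil_of_le (by omega), pvRunLoop]

-- folding A's step over a run of equal values is one bulk insert
theorem pvStep_replicate (attacks v : Int) (n : Nat) :
    ∀ d : PySem.Dict Int Int,
      (List.replicate n v).foldl (pvStep attacks)
        (d.insert (if v ≤ attacks then v else attacks)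
          (d.getD (if v ≤ attacks then v else attacks) 0 + 1))
      = d.insert (if v ≤ attacks then v else attacks)
          (d.getD (if v ≤ attacks then v else attacks) 0 + ((n : Int) + 1)) := by
  induction n with
  | zero => intro d; simp
  | succ n ih =>
    intro d
    set k := if v ≤ attacks then v else attacks with hk
    have hstep : pvStep attacks (d.insert k (d.getD k 0 + 1)) v
        = d.insert k (d.getD k 0 + 1 + 1) := by
      have hv : (if v > attacks then attacks else v) = k := by
        simp only [hk]; split_ifs <;> omega
      simp [pvStep, hv, PySem.Dict.getD_insert_self, PySem.Dict.insert_insert_self]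
    have h2 : d.insert k (d.getD k 0 + 1 + 1)
        = (d.insert k (d.getD k 0 + 1)).insert k
            ((d.insert k (d.getD k 0 + 1)).getD k 0 + 1) := by
      simp [PySem.Dict.getD_insert_self, PySem.Dict.insert_insert_self]
    rw [List.replicate_succ, List.foldl_cons, hstep, h2, ih (d.insert k (d.getD k 0 + 1))]
    simp only [PySem.Dict.getD_insert_self, PySem.Dict.insert_insert_self]
    congr 1
    push_cast
    ring

-- B's run-by-run loop computes A's per-element fold
theorem pvRunLoop_eq_foldl (attacks : Int) :
    ∀ xs : List Int, ∀ d : PySem.Dict Int Int,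
      pvRunLoop attacks xs d = xs.foldl (pvStep attacks) d := by
  have main : ∀ (n : Nat) (xs : List Int), xs.length ≤ n → ∀ d : PySem.Dict Int Int,
      pvRunLoop attacks xs d = xs.foldl (pvStep attacks) d := by
    intro n
    induction n with
    | zero =>
      intro xs hlen d
      have : xs = [] := List.eq_nil_of_length_eq_zero (Nat.le_zero.mp hlen)
      subst this; simp [pvRunLoop]
    | succ n ih =>
      intro xs hlen d
      cases xs with
      | nil => simp [pvRunLoop]
      | cons v xs =>
        rw [pvRunLoop]
        set p := pvCountRun v xs with hp
        set key := if v ≤ attacks then v else attacks with hkey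
        have hrest : p.2.length ≤ n := by
          have := pvCountRun_len v xs
          simp only [← hp] at this
          simp only [List.length_cons] at hlen
          omega
        rw [ih p.2 hrest]
        have hsplit := pvCountRun_split v xs
        rw [← hp] at hsplit
        have hstep1 : pvStep attacks d v = d.insert key (d.getD key 0 + 1) := by
          have hv : (if v > attacks then attacks else v) = key := by
            rw [hkey]; split_ifs <;> omega
          simp [pvStep, hv]
        calc p.2.foldl (pvStep attacks) (d.insert key (d.getD key 0 + ((p.1 : Int) + 1)))
            = (List.replicate p.1 v ++ p.2).foldl (pvStep attacks)
                (d.insert key (d.getD key 0 + 1)) := by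
              rw [List.foldl_append]
              have := pvStep_replicate attacks v p.1 d
              rw [← hkey] at this
              rw [this]
          _ = xs.foldl (pvStep attacks) (pvStep attacks d v) := by
              rw [hstep1, ← hsplit]
          _ = (v :: xs).foldl (pvStep attacks) d := by rw [List.foldl_cons]
  intro xs d
  exact main xs.length xs (le_refl _) d

-- ===== VERDICT (by name: the statement is the Claim_ definition above) =====
theorem create_prob_dict_spec : Claim_equal_create_prob_dict := by
  intro data attacks _
  unfold Spec_create_prob_dict create_prob_dict create_prob_dict_alt
  dsimp only []
  have h := pvIdxLoop_eq_runLoop (PySem.List.sorted data (fun x => x) false) attacks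
    (PySem.List.sorted data (fun x => x) false).length 0 (by omega) PySem.Dict.empty
  rw [List.drop_zero] at h
  rw [h, pvRunLoop_eq_foldl]
  rfl
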